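-- pv_equiv track=rewrite | github.com/odobromyrova/advent-of-code | 2020/scripts/day_11.py | calculate_occ_seats_to_the_right
-- ===== SOURCE A (Python) =====
-- def calculate_occ_seats_to_the_right(seat_id, line, seat_counter):
--     for seat_id_iter in range(seat_id + 1, len(line)):
--         if line[seat_id_iter] == 'L':
--             break
--         elif line[seat_id_iter] == '#':
--             seat_counter += 1
--             break
--
--     return seat_counter
-- ===== SOURCE B (Python) =====
-- def calculate_occ_seats_to_the_right(seat_id, line, seat_counter):
--     rest = line[seat_id + 1:]
--     i_hash = rest.index('#') if '#' in rest else -1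
--     i_l = rest.index('L') if 'L' in rest else -1
--     if i_hash != -1 and (i_l == -1 or i_hash < i_l):
--         seat_counter += 1
--     return seat_counter
-- ===== Notes on version B (the rewrite author's own statement) =====
-- stated objective: alternative
-- what changed: Replaces A's single left-to-right scan with early break by two independent positional lookups (index of the first '#' and of the first 'L' in the remainder) whose positions are then compared arithmetically to decide the increment.
-- intended difference: For seat_id < -1 (with -len(line) <= seat_id+1) whose wrapped tail line[seat_id+1:] contains no seat while the line's first seat overall is '#', A's negative-index wraparound keeps scanning from the front and returns seat_counter+1; B returns seat_counter unchanged, the intended value since there is no occupied seat to the right. — e.g. on calculate_occ_seats_to_the_right(-2, ["#", "."], 0): A returns 1, B returns 0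
import Mathlib
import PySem

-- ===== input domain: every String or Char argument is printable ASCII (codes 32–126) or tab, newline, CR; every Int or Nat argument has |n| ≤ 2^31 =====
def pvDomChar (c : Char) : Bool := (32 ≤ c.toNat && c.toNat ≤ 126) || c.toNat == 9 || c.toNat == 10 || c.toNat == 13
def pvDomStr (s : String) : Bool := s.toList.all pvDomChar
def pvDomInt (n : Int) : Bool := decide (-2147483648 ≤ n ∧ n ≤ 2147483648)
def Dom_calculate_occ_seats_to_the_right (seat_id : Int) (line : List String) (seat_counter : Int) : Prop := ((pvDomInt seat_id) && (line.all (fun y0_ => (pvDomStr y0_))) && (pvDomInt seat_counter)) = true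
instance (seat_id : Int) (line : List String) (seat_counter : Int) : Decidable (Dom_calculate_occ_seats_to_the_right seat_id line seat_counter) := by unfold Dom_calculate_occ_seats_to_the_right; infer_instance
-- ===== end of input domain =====

-- B replaces A's single scan-with-break by two independent positional lookups (first '#', first 'L')
-- compared arithmetically (objective: alternative decomposition).
-- ===== PORT A =====
-- the for-loop over range(seat_id+1, len(line)) with its two break branches, as structural recursion over the index list
def pvScanA (line : List String) (seat_counter : Int) : List Int → Int
  | [] => seat_counter
  | i :: rest =>
    match PySem.List.pyGet? line i with
    | none => seat_counter   -- IndexError in Python; excluded by Pre_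
    | some s =>
      if s = "L" then seat_counter
      else if s = "#" then seat_counter + 1
      else pvScanA line seat_counter rest

def calculate_occ_seats_to_the_right (seat_id : Int) (line : List String) (seat_counter : Int) : Int :=
  pvScanA line seat_counter (PySem.List.pyRange (seat_id + 1) (line.length : Int) 1)

-- ===== PORT B =====
-- i_hash = rest.index('#') if '#' in rest else -1 ; i_l likewise ; then the arithmetic comparison
def pvPick (rest : List String) (seat_counter : Int) : Int :=
  let i_hash : Int := match PySem.List.index? rest "#" with | some i => (i : Int) | none => -1
  let i_l : Int := match PySem.List.index? rest "L" with | some i => (i : Int) | none => -1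
  if i_hash ≠ -1 ∧ (i_l = -1 ∨ i_hash < i_l) then seat_counter + 1 else seat_counter

def calculate_occ_seats_to_the_right_alt (seat_id : Int) (line : List String) (seat_counter : Int) : Int :=
  pvPick (PySem.List.slice line (some (seat_id + 1)) none) seat_counter

-- ===== PRECONDITION & SPEC =====
-- Pre_ excludes exactly the inputs where A raises IndexError: seat_id + 1 below -len(line).
def Pre_calculate_occ_seats_to_the_right (seat_id : Int) (line : List String) (seat_counter : Int) : Prop :=
  -(line.length : Int) ≤ seat_id + 1
instance (seat_id : Int) (line : List String) (seat_counter : Int) : Decidable (Pre_calculate_occ_seats_to_the_right seat_id line seat_counter) := by unfold Pre_calculate_occ_seats_to_the_right; infer_instance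

def pvWitness_calculate_occ_seats_to_the_right : Int × List String × Int := (0, ["L", "#"], 0)

-- For seat_id+1 < 0 whose wrapped tail line[seat_id+1:] contains no seat ('L'/'#') while the line's first seat
-- overall is '#', A's negative-index wraparound keeps scanning from the front and returns seat_counter+1;
-- B returns seat_counter unchanged, the intended value since there is no occupied seat to the right.
def D_calculate_occ_seats_to_the_right (seat_id : Int) (line : List String) (seat_counter : Int) : Prop :=
  seat_id + 1 < 0 ∧
  (∀ x ∈ line.drop ((line.length : Int) + seat_id + 1).toNat, ¬ ((x == "L" || x == "#") = true)) ∧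
  line.find? (fun s => s == "L" || s == "#") = some "#"
instance (seat_id : Int) (line : List String) (seat_counter : Int) : Decidable (D_calculate_occ_seats_to_the_right seat_id line seat_counter) := by unfold D_calculate_occ_seats_to_the_right; infer_instance

def Spec_calculate_occ_seats_to_the_right (seat_id : Int) (line : List String) (seat_counter : Int) (out : Int) : Prop := ¬ D_calculate_occ_seats_to_the_right seat_id line seat_counter → out = calculate_occ_seats_to_the_right_alt seat_id line seat_counter
instance (seat_id : Int) (line : List String) (seat_counter : Int) (out : Int) : Decidable (Spec_calculate_occ_seats_to_the_right seat_id line seat_counter out) := by unfold Spec_calculate_occ_seats_to_the_right; infer_instance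

def pvDiffWitness_calculate_occ_seats_to_the_right : Int × List String × Int := (-2, ["#", "."], 0)
def pvDiffWitnessOut_calculate_occ_seats_to_the_right : Int × Int := (1, 0)

-- ===== CLAIM (what is proved, stated in full; the proofs are below) =====
def Claim_unchanged_calculate_occ_seats_to_the_right : Prop := ∀ (seat_id : Int) (line : List String) (seat_counter : Int), Dom_calculate_occ_seats_to_the_right seat_id line seat_counter → Pre_calculate_occ_seats_to_the_right seat_id line seat_counter → Spec_calculate_occ_seats_to_the_right seat_id line seat_counter (calculate_occ_seats_to_the_right seat_id line seat_counter)
def Claim_changed_calculate_occ_seats_to_the_right : Prop := Dom_calculate_occ_seats_to_the_right (pvDiffWitness_calculate_occ_seats_to_the_right.1) (pvDiffWitness_calculate_occ_seats_to_the_right.2.1) (pvDiffWitness_calculate_occ_seats_to_the_right.2.2) ∧ Pre_calculate_occ_seats_to_the_right (pvDiffWitness_calculate_occ_seats_to_the_right.1) (pvDiffWitness_calculate_occ_seats_to_the_right.2.1) (pvDiffWitness_calculate_occ_seats_to_the_right.2.2) ∧ D_calculate_occ_seats_to_the_right (pvDiffWitness_calculate_occ_seats_to_the_right.1) (pvDiffWitness_calculate_occ_seats_to_the_right.2.1)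 (pvDiffWitness_calculate_occ_seats_to_the_right.2.2) ∧ calculate_occ_seats_to_the_right (pvDiffWitness_calculate_occ_seats_to_the_right.1) (pvDiffWitness_calculate_occ_seats_to_the_right.2.1) (pvDiffWitness_calculate_occ_seats_to_the_right.2.2) = pvDiffWitnessOut_calculate_occ_seats_to_the_right.1 ∧ calculate_occ_seats_to_the_right_alt (pvDiffWitness_calculate_occ_seats_to_the_right.1) (pvDiffWitness_calculate_occ_seats_to_the_right.2.1) (pvDiffWitness_calculate_occ_seats_to_the_right.2.2) = pvDiffWitnessOut_calculate_occ_seats_to_the_right.2 ∧ pvDiffWitnessOut_calculate_occ_seats_to_the_right.1 ≠ pvDiffWitnessOut_calculate_occ_seats_to_the_right.2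
def Claim_exact_calculate_occ_seats_to_the_right : Prop := ∀ (seat_id : Int) (line : List String) (seat_counter : Int), Dom_calculate_occ_seats_to_the_right seat_id line seat_counter → Pre_calculate_occ_seats_to_the_right seat_id line seat_counter → D_calculate_occ_seats_to_the_right seat_id line seat_counter → calculate_occ_seats_to_the_right seat_id line seat_counter ≠ calculate_occ_seats_to_the_right_alt seat_id line seat_counter

-- ===== LEMMAS AND PROOFS =====

-- B's two-index comparison picks the increment exactly when the first seat of the remainder is '#'
theorem pvPick_eq_find (r : List String) (sc : Int) :
    pvPick r sc = (if r.find? (fun x => x == "L" || x == "#") = some "#" then sc + 1 else sc) := by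
  induction r with
  | nil =>
      simp [pvPick, PySem.List.index?_eq_idxOf?]
  | cons x r ih =>
      by_cases hH : x = "#"
      · subst hH
        rw [pvPick, PySem.List.index?_cons_self,
            PySem.List.index?_cons_of_ne r (by decide : ("#" : String) ≠ "L")]
        cases hL : PySem.List.index? r "L" with
        | none => simp
        | some k =>
            simp
      · by_cases hL : x = "L"
        · subst hL
          rw [pvPick, PySem.List.index?_cons_self,
              PySem.List.index?_cons_of_ne r (by decide : ("L" : String) ≠ "#")]
          cases hHk : PySem.List.index? r "#" with
          | none => simp
          | some k =>
              simp
              omega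
        · have hstep : pvPick (x :: r) sc = pvPick r sc := by
            rw [pvPick, pvPick,
                PySem.List.index?_cons_of_ne r (fun h => hH h),
                PySem.List.index?_cons_of_ne r (fun h => hL h)]
            cases hHk : PySem.List.index? r "#" with
            | none => simp
            | some j =>
                cases hLk : PySem.List.index? r "L" with
                | none =>
                    simp
                    omega
                | some k =>
                    simp
                    split_ifs with h1 h2 <;> omega
          have hpred : (x == "L" || x == "#") = false := by
            simp [hL, hH]
          rw [hstep, ih, List.find?_cons, hpred]

-- A's loop over the nonnegative indices s..n-1 is decided by the first seat of l.drop s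
theorem pvScanA_nonneg (l : List String) (sc : Int) (s : Nat) :
    pvScanA l sc (PySem.List.pyRange (s : Int) (l.length : Int) 1) =
      (if (l.drop s).find? (fun x => x == "L" || x == "#") = some "#" then sc + 1 else sc) := by
  induction hd : l.length - s generalizing s with
  | zero =>
      have hle : l.length ≤ s := by omega
      rw [PySem.List.pyRange_one_eq_nil (by exact_mod_cast hle), List.drop_eq_nil_of_le hle]
      simp [pvScanA]
  | succ d ih =>
      have hs : s < l.length := by omega
      rw [PySem.List.pyRange_one_cons (by exact_mod_cast hs),
          List.drop_eq_getElem_cons hs]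
      have hget : PySem.List.pyGet? l (s : Int) = some l[s] := by
        rw [PySem.List.pyGet?_natCast]; exact List.getElem?_eq_getElem hs
      simp only [pvScanA, hget, List.find?_cons]
      by_cases hL : l[s] = "L"
      · simp [hL]
      · by_cases hH : l[s] = "#"
        · simp [hH]
        · have hp : (l[s] == "L" || l[s] == "#") = false := by simp [hL, hH]
          simp only [hp, if_neg hL, if_neg hH]
          have hcast : ((s : Int) + 1) = ((s + 1 : Nat) : Int) := by push_cast; ring
          rw [hcast, ih (s+1) (by omega)]

-- A's loop starting at a negative index -k (k ≤ n): scan the wrapped tail; if it has no seat, continue over the whole line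
theorem pvScanA_neg (l : List String) (sc : Int) :
    ∀ (k : Nat), 0 < k → k ≤ l.length →
    pvScanA l sc (PySem.List.pyRange (-(k : Int)) (l.length : Int) 1) =
      (match (l.drop (l.length - k)).find? (fun x => x == "L" || x == "#") with
       | some x => if x = "#" then sc + 1 else sc
       | none => if l.find? (fun x => x == "L" || x == "#") = some "#" then sc + 1 else sc) := by
  intro k
  induction k with
  | zero => intro h; omega
  | succ k ih =>
      intro _ hkn
      have hneg : (-(((k:Nat)+1 : Nat) : Int)) < (l.length : Int) := by
        have : (0:Int) ≤ l.length := by positivity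
        push_cast; omega
      rw [PySem.List.pyRange_one_cons hneg]
      have hlt : l.length - (k+1) < l.length := by omega
      have hget : PySem.List.pyGet? l (-(((k:Nat)+1 : Nat) : Int)) = some l[l.length - (k+1)] := by
        rw [PySem.List.pyGet?_neg_natCast l (k+1) (by omega) hkn]
        exact List.getElem?_eq_getElem hlt
      have hdrop : l.drop (l.length - (k+1)) = l[l.length - (k+1)] :: l.drop (l.length - k) := by
        have he : l.length - (k+1) + 1 = l.length - k := by omega
        rw [List.drop_eq_getElem_cons hlt, he]
      rw [hdrop]
      simp only [pvScanA, hget, List.find?_cons]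
      by_cases hL : l[l.length - (k+1)] = "L"
      · simp [hL]
      · by_cases hH : l[l.length - (k+1)] = "#"
        · simp [hH]
        · have hp : (l[l.length - (k+1)] == "L" || l[l.length - (k+1)] == "#") = false := by
            simp [hL, hH]
          simp only [hp, if_neg hL, if_neg hH]
          rcases Nat.eq_zero_or_pos k with h0 | hkpos
          · subst h0
            have hc : (-(((0:Nat)+1 : Nat) : Int) + 1) = ((0 : Nat) : Int) := by norm_num
            rw [hc, pvScanA_nonneg l sc 0]
            have hde : l.drop (l.length - 0) = [] := by simp
            rw [hde]
            simp
          · have hc : (-(((k:Nat)+1 : Nat) : Int) + 1) = (-(k : Int)) := by push_cast; ring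
            rw [hc, ih hkpos (by omega)]

-- ===== VERDICT (by name: the statement is the Claim_ definition above) =====
theorem calculate_occ_seats_to_the_right_spec : Claim_unchanged_calculate_occ_seats_to_the_right := by
  intro seat_id line sc _hDom hPre hnD
  unfold Pre_calculate_occ_seats_to_the_right at hPre
  simp only [calculate_occ_seats_to_the_right, calculate_occ_seats_to_the_right_alt]
  rw [pvPick_eq_find]
  by_cases hs : 0 ≤ seat_id + 1
  · have hcast : seat_id + 1 = (((seat_id + 1).toNat : Nat) : Int) := (Int.toNat_of_nonneg hs).symm
    rw [PySem.List.slice_from line hs, hcast, pvScanA_nonneg line sc (seat_id + 1).toNat, Int.toNat_natCast]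
  · set k : Nat := (-(seat_id + 1)).toNat with hkdef
    have hk : 0 < k := by omega
    have hkn : k ≤ line.length := by omega
    have hsk : seat_id + 1 = -(k : Int) := by omega
    rw [PySem.List.slice_some_none, hsk, PySem.List.clampIdx_neg_natCast line.length k hk,
        pvScanA_neg line sc k hk hkn]
    cases hfind : (line.drop (line.length - k)).find? (fun x => x == "L" || x == "#") with
    | some x =>
        by_cases hx : x = "#"
        · simp [hx]
        · simp [hx]
    | none =>
        have htail : ∀ x ∈ line.drop ((line.length : Int) + seat_id + 1).toNat,
            ¬ ((x == "L" || x == "#") = true) := by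
          have he : ((line.length : Int) + seat_id + 1).toNat = line.length - k := by omega
          rw [he]
          exact List.find?_eq_none.mp hfind
        have hnf : line.find? (fun x => x == "L" || x == "#") ≠ some "#" := by
          intro hcontra
          exact hnD ⟨by omega, htail, hcontra⟩
        simp [hnf]

theorem calculate_occ_seats_to_the_right_changed : Claim_changed_calculate_occ_seats_to_the_right := by
  unfold Claim_changed_calculate_occ_seats_to_the_right; decide

theorem calculate_occ_seats_to_the_right_tight : Claim_exact_calculate_occ_seats_to_the_right := by
  intro seat_id line sc _hDom hPre hD
  obtain ⟨hneg, htail, hfirst⟩ := hD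
  unfold Pre_calculate_occ_seats_to_the_right at hPre
  simp only [calculate_occ_seats_to_the_right, calculate_occ_seats_to_the_right_alt]
  rw [pvPick_eq_find]
  set k : Nat := (-(seat_id + 1)).toNat with hkdef
  have hk : 0 < k := by omega
  have hkn : k ≤ line.length := by omega
  have hsk : seat_id + 1 = -(k : Int) := by omega
  have hfind : (line.drop (line.length - k)).find? (fun x => x == "L" || x == "#") = none := by
    apply List.find?_eq_none.mpr
    have he : ((line.length : Int) + seat_id + 1).toNat = line.length - k := by omega
    rw [he] at htail
    exact htail
  rw [PySem.List.slice_some_none, hsk, PySem.List.clampIdx_neg_natCast line.length k hk,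
      pvScanA_neg line sc k hk hkn, hfind]
  simp [hfirst]
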